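-- pv_equiv track=rewrite | github.com/mapleleaflatte03/meridian-intelligence | company/meridian_platform/loom_schedule_bridge.py | _parse_findings_markdown
-- ===== SOURCE A (Python) =====
-- def _parse_findings_markdown(findings_text: str) -> list[dict[str, str]]:
--     findings: list[dict[str, str]] = []
--     current: dict[str, str] | None = None
--     for raw in findings_text.splitlines():
--         line = raw.rstrip()
--         stripped = line.strip()
--         if stripped.startswith("- Fact:"):
--             if current:
--                 findings.append(current)
--             current = {"fact": stripped.split(":", 1)[1].strip()}
--             continue
--         if not current:
--             continue
--         if stripped.startswith("- Observed:"):
--             current["observed"] = stripped.split(":", 1)[1].strip()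
--         elif stripped.startswith("- Source:"):
--             current["source"] = stripped.split(":", 1)[1].strip()
--         elif stripped.startswith("- Category:"):
--             current["category"] = stripped.split(":", 1)[1].strip()
--     if current:
--         findings.append(current)
--     return findings
-- ===== SOURCE B (Python) =====
-- FIELD_PREFIXES = (("observed", "- Observed:"), ("source", "- Source:"), ("category", "- Category:"))
--
--
-- def _parse_findings_markdown(findings_text: str) -> list[dict[str, str]]:
--     # pass 1: split the stripped lines into record groups, one per '- Fact:' line
--     lines = [raw.strip() for raw in findings_text.splitlines()]
--     groups: list[list[str]] = []
--     for s in lines: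
--         if s.startswith("- Fact:"):
--             groups.append([s])
--         elif groups:
--             groups[-1].append(s)
--     # pass 2: map each group to a record
--     return [_group_to_record(g) for g in groups]
--
--
-- def _group_to_record(group: list[str]) -> dict[str, str]:
--     record = {"fact": group[0].split(":", 1)[1].strip()}
--     for s in group[1:]:
--         for key, prefix in FIELD_PREFIXES:
--             if s.startswith(prefix):
--                 record[key] = s.split(":", 1)[1].strip()
--                 break
--     return record
-- ===== Notes on version B (the rewrite author's own statement) =====
-- stated objective: alternative
-- what changed: Replaced A's single interleaved state-machine loop (findings/current state with an if/elif field chain) by a two-pass decomposition: first split the stripped lines into '- Fact:'-delimited groups, then map each group to a record via a prefix table scanned with find-first-match.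
import Mathlib
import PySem

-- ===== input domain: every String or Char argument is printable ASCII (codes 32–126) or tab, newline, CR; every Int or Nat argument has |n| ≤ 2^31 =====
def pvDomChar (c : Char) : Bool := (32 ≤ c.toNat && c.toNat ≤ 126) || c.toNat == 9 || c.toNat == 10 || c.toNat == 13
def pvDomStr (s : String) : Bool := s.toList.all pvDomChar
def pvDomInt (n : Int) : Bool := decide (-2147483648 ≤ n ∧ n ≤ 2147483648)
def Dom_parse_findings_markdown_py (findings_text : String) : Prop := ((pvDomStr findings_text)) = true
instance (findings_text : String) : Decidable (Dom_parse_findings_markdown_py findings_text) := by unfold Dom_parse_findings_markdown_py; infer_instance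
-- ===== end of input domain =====

-- B re-parses the text in two passes (split into '- Fact:'-groups, then map each group to a record)
-- instead of A's single interleaved state-machine loop; objective: alternative decomposition, same cost.

-- ===== PORT A =====
-- stripped.split(":", 1)[1].strip() — index 1 always exists here since the callers only
-- evaluate it on lines that start with a prefix containing ':' (the getD defaults are never used)
def pvVal (stripped : String) : String :=
  PySem.Str.strip (PySem.List.pyGetD ((PySem.Str.splitMax? stripped ":" 1).getD []) 1 "")

-- the body of A's `for raw in findings_text.splitlines()` loop; state = (findings, current).
-- `if current:` — current is None or a dict that always contains "fact", so truthiness = isSome (exact here)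
def pvAStep (st : List (PySem.Dict String String) × Option (PySem.Dict String String))
    (raw : String) : List (PySem.Dict String String) × Option (PySem.Dict String String) :=
  let line := PySem.Str.rstrip raw
  let stripped := PySem.Str.strip line
  if PySem.Str.startswith stripped "- Fact:" then
    ((match st.2 with | some c => st.1 ++ [c] | none => st.1),
     some (PySem.Dict.empty.insert "fact" (pvVal stripped)))
  else
    match st.2 with
    | none => st
    | some c =>
      if PySem.Str.startswith stripped "- Observed:" then
        (st.1, some (c.insert "observed" (pvVal stripped)))
      else if PySem.Str.startswith stripped "- Source:" then
        (st.1, some (c.insert "source" (pvVal stripped)))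
      else if PySem.Str.startswith stripped "- Category:" then
        (st.1, some (c.insert "category" (pvVal stripped)))
      else st

def parse_findings_markdown_py (findings_text : String) : List (List (String × String)) :=
  let fin := (PySem.Str.splitlines findings_text).foldl pvAStep ([], none)
  (match fin.2 with | some c => fin.1 ++ [c] | none => fin.1).map PySem.Dict.items

-- ===== PORT B =====
def pvFieldPrefixes : List (String × String) :=
  [("observed", "- Observed:"), ("source", "- Source:"), ("category", "- Category:")]

-- Source B's inner `for key, prefix in FIELD_PREFIXES: if s.startswith(prefix): …; break`
def pvApplyField (record : PySem.Dict String String) (s : String) : PySem.Dict String String :=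
  match pvFieldPrefixes.find? (fun kp => PySem.Str.startswith s kp.2) with
  | some kp => record.insert kp.1 (pvVal s)
  | none => record

-- Source B's _group_to_record; group[0] via pyGetD (groups are never empty), group[1:] = tail
def pvGroupToRecord (g : List String) : PySem.Dict String String :=
  g.tail.foldl pvApplyField (PySem.Dict.empty.insert "fact" (pvVal (PySem.List.pyGetD g 0 "")))

-- Source B's grouping-loop body: new group on '- Fact:', else append to the last group if any
def pvGroupStep (gs : List (List String)) (s : String) : List (List String) :=
  if PySem.Str.startswith s "- Fact:" then gs ++ [[s]]
  else if gs = [] then gs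
  else gs.dropLast ++ [(gs.getLast?.getD []) ++ [s]]

def parse_findings_markdown_py_alt (findings_text : String) : List (List (String × String)) :=
  let lines := (PySem.Str.splitlines findings_text).map PySem.Str.strip
  let groups := lines.foldl pvGroupStep []
  groups.map (fun g => (pvGroupToRecord g).items)

-- ===== PRECONDITION & SPEC =====
def Spec_parse_findings_markdown_py (findings_text : String) (out : List (List (String × String))) : Prop := out = parse_findings_markdown_py_alt findings_text
instance (findings_text : String) (out : List (List (String × String))) : Decidable (Spec_parse_findings_markdown_py findings_text out) := by unfold Spec_parse_findings_markdown_py; infer_instance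

-- ===== CLAIM (what is proved, stated in full; the proofs are below) =====
def Claim_equal_parse_findings_markdown_py : Prop := ∀ (findings_text : String), Dom_parse_findings_markdown_py findings_text → Spec_parse_findings_markdown_py findings_text (parse_findings_markdown_py findings_text)

-- ===== LEMMAS AND PROOFS =====

-- strip(rstrip(x)) = strip(x): dropping whitespace from the right twice changes nothing
lemma rdropWhile_cons {α : Type} (p : α → Bool) (a : α) (l : List α) :
    List.rdropWhile p (a :: l) =
      if List.rdropWhile p l = [] then (if p a then [] else [a])
      else a :: List.rdropWhile p l := by
  unfold List.rdropWhile
  rw [List.reverse_cons, List.dropWhile_append]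
  by_cases h : List.dropWhile p l.reverse = [] <;>
    by_cases hp : p a <;>
    simp [h, hp, List.reverse_eq_nil_iff]

lemma dropWhile_rdropWhile_comm {α : Type} (p : α → Bool) (l : List α) :
    List.dropWhile p (List.rdropWhile p l) = List.rdropWhile p (List.dropWhile p l) := by
  induction l with
  | nil => simp
  | cons a l ih =>
    by_cases hp : p a
    · rw [List.dropWhile_cons_of_pos hp, rdropWhile_cons]
      by_cases h0 : List.rdropWhile p l = []
      · simp [h0, hp, ← ih]
      · simp [h0, List.dropWhile_cons_of_pos hp, ih]
    · rw [List.dropWhile_cons_of_neg hp, rdropWhile_cons]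
      by_cases h0 : List.rdropWhile p l = [] <;>
        simp [h0, hp, List.dropWhile_cons_of_neg hp]

lemma chars_strip_rstrip (l : List Char) :
    PySem.Chars.strip (PySem.Chars.rstrip l) = PySem.Chars.strip l := by
  show PySem.Chars.rstrip (PySem.Chars.lstrip (PySem.Chars.rstrip l)) = _
  have hr : ∀ m : List Char, PySem.Chars.rstrip m = List.rdropWhile PySem.Chars.isspace m :=
    fun m => rfl
  have hl : ∀ m : List Char, PySem.Chars.lstrip m = List.dropWhile PySem.Chars.isspace m :=
    fun m => rfl
  rw [PySem.Chars.strip, hr, hr, hr, hl, hl, dropWhile_rdropWhile_comm,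
    List.rdropWhile_idempotent]

lemma str_strip_rstrip (s : String) :
    PySem.Str.strip (PySem.Str.rstrip s) = PySem.Str.strip s := by
  have h : (PySem.Str.strip (PySem.Str.rstrip s)).toList = (PySem.Str.strip s).toList := by
    simp [chars_strip_rstrip]
  exact String.toList_inj.mp h

-- A's loop body, already on the stripped line
def pvAStepS (st : List (PySem.Dict String String) × Option (PySem.Dict String String))
    (s : String) : List (PySem.Dict String String) × Option (PySem.Dict String String) :=
  if PySem.Str.startswith s "- Fact:" then
    ((match st.2 with | some c => st.1 ++ [c] | none => st.1),
     some (PySem.Dict.empty.insert "fact" (pvVal s)))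
  else
    match st.2 with
    | none => st
    | some c =>
      if PySem.Str.startswith s "- Observed:" then (st.1, some (c.insert "observed" (pvVal s)))
      else if PySem.Str.startswith s "- Source:" then (st.1, some (c.insert "source" (pvVal s)))
      else if PySem.Str.startswith s "- Category:" then (st.1, some (c.insert "category" (pvVal s)))
      else st

lemma pvAStep_eq_stepS :
    pvAStep = fun st raw => pvAStepS st (PySem.Str.strip raw) := by
  funext st raw
  show pvAStepS st (PySem.Str.strip (PySem.Str.rstrip raw)) = _
  rw [str_strip_rstrip]

-- B's prefix-table dispatch equals A's if/elif chain
lemma pvApplyField_eq (d : PySem.Dict String String) (s : String) :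
    pvApplyField d s =
      (if PySem.Str.startswith s "- Observed:" then d.insert "observed" (pvVal s)
       else if PySem.Str.startswith s "- Source:" then d.insert "source" (pvVal s)
       else if PySem.Str.startswith s "- Category:" then d.insert "category" (pvVal s)
       else d) := by
  simp only [pvApplyField, pvFieldPrefixes, List.find?]
  cases h1 : PySem.Str.startswith s "- Observed:" <;>
    cases h2 : PySem.Str.startswith s "- Source:" <;>
      cases h3 : PySem.Str.startswith s "- Category:" <;>
        simp

-- abstraction: B's group state seen as A's (findings, current) state
def pvAbs (gs : List (List String)) :
    List (PySem.Dict String String) × Option (PySem.Dict String String) :=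
  match gs.getLast? with
  | none => ([], none)
  | some g => (gs.dropLast.map pvGroupToRecord, some (pvGroupToRecord g))

lemma pvAbs_concat (init : List (List String)) (g : List String) :
    pvAbs (init ++ [g]) = (init.map pvGroupToRecord, some (pvGroupToRecord g)) := by
  simp [pvAbs]

lemma pvGroupToRecord_singleton (s : String) :
    pvGroupToRecord [s] = PySem.Dict.empty.insert "fact" (pvVal s) := by
  simp [pvGroupToRecord, PySem.List.pyGetD]

lemma pvGroupToRecord_append (g : List String) (hg : g ≠ []) (s : String) :
    pvGroupToRecord (g ++ [s]) = pvApplyField (pvGroupToRecord g) s := by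
  rcases g with _ | ⟨a, t⟩
  · exact absurd rfl hg
  · simp [pvGroupToRecord, List.foldl_append, PySem.List.pyGetD]

lemma pvGroupStep_pos (gs : List (List String)) (s : String)
    (hf : PySem.Str.startswith s "- Fact:" = true) : pvGroupStep gs s = gs ++ [[s]] := by
  unfold pvGroupStep; rw [if_pos hf]

lemma pvGroupStep_neg_concat (init : List (List String)) (g : List String) (s : String)
    (hf : PySem.Str.startswith s "- Fact:" = false) :
    pvGroupStep (init ++ [g]) s = init ++ [g ++ [s]] := by
  unfold pvGroupStep
  rw [if_neg (by rw [hf]; decide), if_neg (by simp)]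
  simp

lemma pvStep_sim (gs : List (List String)) (s : String) (h : ∀ g ∈ gs, g ≠ []) :
    pvAStepS (pvAbs gs) s = pvAbs (pvGroupStep gs s) := by
  rcases List.eq_nil_or_concat gs with rfl | ⟨init, g, hgs⟩
  · by_cases hf : PySem.Str.startswith s "- Fact:" = true
    · rw [pvGroupStep_pos [] s hf, show ([] : List (List String)) ++ [[s]] = [] ++ [[s]] from rfl,
        pvAbs_concat]
      unfold pvAStepS
      rw [if_pos hf]
      simp [pvAbs, pvGroupToRecord_singleton]
    · rw [show pvGroupStep [] s = [] by unfold pvGroupStep; rw [if_neg hf]; simp]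
      unfold pvAStepS
      rw [if_neg hf]
      simp [pvAbs]
  · subst hgs
    simp only [List.concat_eq_append] at h ⊢
    have hg : g ≠ [] := h g (by simp)
    rw [pvAbs_concat]
    by_cases hf : PySem.Str.startswith s "- Fact:" = true
    · rw [pvGroupStep_pos _ s hf, pvAbs_concat, pvGroupToRecord_singleton]
      unfold pvAStepS
      rw [if_pos hf]
      simp
    · rw [pvGroupStep_neg_concat init g s (by simpa using hf), pvAbs_concat,
        pvGroupToRecord_append g hg s, pvApplyField_eq]
      unfold pvAStepS
      rw [if_neg hf]
      simp only
      split_ifs <;> rfl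

lemma pvGroupStep_nonempty (gs : List (List String)) (s : String)
    (h : ∀ g ∈ gs, g ≠ []) : ∀ g ∈ pvGroupStep gs s, g ≠ [] := by
  intro g hmem
  unfold pvGroupStep at hmem
  split_ifs at hmem with hf he
  · rcases List.mem_append.mp hmem with hm | hm
    · exact h g hm
    · simp at hm; simp [hm]
  · exact h g hmem
  · rcases List.mem_append.mp hmem with hm | hm
    · exact h g (List.Sublist.subset (List.dropLast_sublist _) hm)
    · simp at hm; simp [hm]

lemma pvFold_sim (ls : List String) (gs : List (List String)) (h : ∀ g ∈ gs, g ≠ []) :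
    ls.foldl pvAStepS (pvAbs gs) = pvAbs (ls.foldl pvGroupStep gs) := by
  induction ls generalizing gs with
  | nil => rfl
  | cons s ls ih =>
    simp only [List.foldl_cons]
    rw [pvStep_sim gs s h]
    exact ih _ (pvGroupStep_nonempty gs s h)

lemma pvFlush (gs : List (List String)) :
    (match (pvAbs gs).2 with
      | some c => (pvAbs gs).1 ++ [c]
      | none => (pvAbs gs).1).map PySem.Dict.items
      = gs.map (fun g => (pvGroupToRecord g).items) := by
  rcases List.eq_nil_or_concat gs with rfl | ⟨init, g, hgs⟩
  · rfl
  · subst hgs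
    simp only [List.concat_eq_append]
    rw [pvAbs_concat]
    simp

-- ===== VERDICT (by name: the statement is the Claim_ definition above) =====
theorem parse_findings_markdown_py_spec : Claim_equal_parse_findings_markdown_py := by
  intro findings_text _
  show parse_findings_markdown_py findings_text = parse_findings_markdown_py_alt findings_text
  simp only [parse_findings_markdown_py, parse_findings_markdown_py_alt]
  rw [pvAStep_eq_stepS, ← List.foldl_map,
    show (([] : List (PySem.Dict String String)),
        (none : Option (PySem.Dict String String))) = pvAbs [] from rfl,
    pvFold_sim _ [] (by simp)]
  exact pvFlush _
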